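-- pv_equiv track=rewrite | github.com/Mohamedfadil/Portfolio_Fadil | scripts/parse-resume.py | slice_section
-- ===== SOURCE A (Python) =====
-- def slice_section(lines: list[str], start: str, end_labels: list[str]) -> list[str]:
--     if start not in lines:
--         return []
--     start_idx = lines.index(start) + 1
--     end_idx = len(lines)
--     for idx in range(start_idx, len(lines)):
--         if lines[idx] in end_labels:
--             end_idx = idx
--             break
--     return lines[start_idx:end_idx]
-- ===== SOURCE B (Python) =====
-- def slice_section(lines: list[str], start: str, end_labels: list[str]) -> list[str]:
--     acc = []
--     collecting = False
--     for line in lines: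
--         if not collecting:
--             if line == start:
--                 collecting = True
--         elif line in end_labels:
--             return acc
--         else:
--             acc.append(line)
--     return acc if collecting else []
-- ===== Notes on version B (the rewrite author's own statement) =====
-- stated objective: alternative
-- what changed: Replaces the membership test + index() + separate index-range scan + slice with a single forward pass carrying a 'collecting' flag and an accumulator, with an early return on the first end label.
import Mathlib
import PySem

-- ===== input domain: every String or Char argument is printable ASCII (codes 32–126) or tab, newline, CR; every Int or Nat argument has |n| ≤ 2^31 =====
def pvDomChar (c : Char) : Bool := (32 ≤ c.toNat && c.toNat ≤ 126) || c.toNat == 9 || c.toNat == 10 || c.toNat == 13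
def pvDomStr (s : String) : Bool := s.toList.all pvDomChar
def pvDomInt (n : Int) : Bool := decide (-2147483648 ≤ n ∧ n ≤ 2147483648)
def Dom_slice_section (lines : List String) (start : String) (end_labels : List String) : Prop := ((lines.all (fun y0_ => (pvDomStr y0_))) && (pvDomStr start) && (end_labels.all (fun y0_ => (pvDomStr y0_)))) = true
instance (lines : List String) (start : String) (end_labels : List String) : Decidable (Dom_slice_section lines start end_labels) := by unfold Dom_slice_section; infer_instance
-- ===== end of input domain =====

-- B replaces A's membership test + index() + index-range scan + slice with one forward pass
-- carrying a collecting flag and an accumulator (alternative decomposition, same cost).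


-- ===== PORT A =====
-- the 'for idx in range(start_idx, len(lines)): if lines[idx] in end_labels: end_idx = idx; break'
-- loop; endDefault is the initial end_idx = len(lines).  Every idx comes from
-- range(start_idx, len(lines)), so lines[idx] is always in range; the 'none' branch is unreachable.
def aFindEnd (lines : List String) (end_labels : List String) (endDefault : Int) : List Int → Int
  | [] => endDefault
  | idx :: rest =>
    match PySem.List.pyGet? lines idx with
    | some l => if end_labels.contains l then idx else aFindEnd lines end_labels endDefault rest
    | none => endDefault

def slice_section (lines : List String) (start : String) (end_labels : List String) : List String :=
  if lines.contains start = false then []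
  else
    match PySem.List.index? lines start with
    | none => []  -- unreachable: start ∈ lines here
    | some i =>
      let start_idx : Int := (i : Int) + 1
      let end_idx : Int :=
        aFindEnd lines end_labels (lines.length : Int)
          (PySem.List.pyRange start_idx (lines.length : Int) 1)
      PySem.List.slice lines (some start_idx) (some end_idx)

-- ===== PORT B =====
def bLoop (start : String) (end_labels : List String) (collecting : Bool) (acc : List String) : List String → List String
  | [] => if collecting then acc else []
  | l :: rest =>
    if !collecting then
      if l == start then bLoop start end_labels true acc rest
      else bLoop start end_labels false acc rest
    else if end_labels.contains l then acc
    else bLoop start end_labels collecting (acc ++ [l]) rest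

def slice_section_alt (lines : List String) (start : String) (end_labels : List String) : List String :=
  bLoop start end_labels false [] lines

-- ===== PRECONDITION & SPEC =====
def Spec_slice_section (lines : List String) (start : String) (end_labels : List String) (out : List String) : Prop := out = slice_section_alt lines start end_labels
instance (lines : List String) (start : String) (end_labels : List String) (out : List String) : Decidable (Spec_slice_section lines start end_labels out) := by unfold Spec_slice_section; infer_instance

-- ===== CLAIM (what is proved, stated in full; the proofs are below) =====
def Claim_equal_slice_section : Prop := ∀ (lines : List String) (start : String) (end_labels : List String), Dom_slice_section lines start end_labels → Spec_slice_section lines start end_labels (slice_section lines start end_labels)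

-- ===== LEMMAS AND PROOFS =====

-- B, collecting phase: accumulate the longest prefix of the remaining lines free of end labels.
lemma bLoop_collect (start : String) (end_labels : List String) (ls : List String) :
    ∀ acc, bLoop start end_labels true acc ls = acc ++ ls.takeWhile (fun l => !(end_labels.contains l)) := by
  induction ls with
  | nil => intro acc; simp [bLoop]
  | cons l rest ih =>
      intro acc
      by_cases h : l ∈ end_labels <;> simp [bLoop, h, ih]

-- B, skipping phase: lines before the first occurrence of start are dropped.
lemma bLoop_skip (start : String) (end_labels : List String) :
    ∀ (pre suf : List String), start ∉ pre →
      bLoop start end_labels false [] (pre ++ start :: suf) = bLoop start end_labels true [] suf := by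
  intro pre
  induction pre with
  | nil => intro suf _; simp [bLoop]
  | cons p ps ih =>
      intro suf h
      have hp : ¬ (p == start) = true := by
        simp only [beq_iff_eq]; intro he; exact h (he ▸ List.mem_cons_self)
      simp only [List.cons_append, bLoop, Bool.not_false, hp]
      exact ih suf (fun hm => h (List.mem_cons_of_mem _ hm))

-- B when start never occurs: nothing is ever collected.
lemma bLoop_none (start : String) (end_labels : List String) :
    ∀ ls : List String, start ∉ ls → bLoop start end_labels false [] ls = [] := by
  intro ls
  induction ls with
  | nil => intro _; simp [bLoop]
  | cons l rest ih =>
      intro h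
      have hl : ¬ (l == start) = true := by
        simp only [beq_iff_eq]; intro he; exact h (he ▸ List.mem_cons_self)
      simp only [bLoop, Bool.not_false, hl]
      exact ih (fun hm => h (List.mem_cons_of_mem _ hm))

-- A's end-index scan starting at position i returns i plus the length of the
-- end-label-free prefix of lines.drop i.
lemma aFindEnd_spec (lines end_labels : List String) :
    ∀ (suf : List String) (i : Nat), i ≤ lines.length → lines.drop i = suf →
      aFindEnd lines end_labels (lines.length : Int)
          (PySem.List.pyRange (i : Int) (lines.length : Int) 1)
        = (i : Int) + ((suf.takeWhile (fun l => !(end_labels.contains l))).length : Int) := by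
  intro suf
  induction suf with
  | nil =>
      intro i hile hdrop
      have : i = lines.length := by
        have := List.drop_eq_nil_iff.mp hdrop; omega
      subst this
      rw [PySem.List.pyRange_one_eq_nil (le_refl _)]
      simp [aFindEnd]
  | cons s rest ih =>
      intro i hile hdrop
      have hlt : i < lines.length := by
        by_contra h
        have : i = lines.length := by omega
        subst this; simp at hdrop
      rw [PySem.List.pyRange_one_cons (by exact_mod_cast hlt)]
      have hget : PySem.List.pyGet? lines (i : Int) = some s := by
        rw [PySem.List.pyGet?_natCast]
        have h0 : (lines.drop i)[0]? = lines[i + 0]? := List.getElem?_drop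
        simp [hdrop] at h0; simpa [hdrop] using h0.symm
      by_cases hend : s ∈ end_labels
      · simp [aFindEnd, hget, hend]
      · have hdrop' : lines.drop (i + 1) = rest := by
          have h1 : List.drop 1 (List.drop i lines) = List.drop (i + 1) lines := List.drop_drop
          rw [← h1, hdrop, List.drop_one, List.tail_cons]
        have hrec := ih (i + 1) (by omega) hdrop'
        push_cast at hrec ⊢
        simp [aFindEnd, hget, hend, hrec]
        omega

-- after the first occurrence of start, lines.drop (pre.length + 1) is exactly suf
lemma drop_after_first (pre suf : List String) (start : String) :
    (pre ++ start :: suf).drop (pre.length + 1) = suf := by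
  induction pre with
  | nil => rfl
  | cons p ps _ => simp

-- ===== VERDICT (by name: the statement is the Claim_ definition above) =====
theorem slice_section_spec : Claim_equal_slice_section := by
  intro lines start end_labels _
  unfold Spec_slice_section slice_section slice_section_alt
  by_cases hmem : start ∈ lines
  · have hc : lines.contains start = true := by simpa using hmem
    rw [if_neg (by simp [hmem])]
    obtain ⟨k, hk⟩ : ∃ k, PySem.List.index? lines start = some k :=
      Option.isSome_iff_exists.mp ((PySem.List.index?_isSome_iff lines start).mpr hmem)
    obtain ⟨pre, suf, hdecomp, hlen, hnotin⟩ := (PySem.List.index?_eq_some_iff lines start k).mp hk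
    rw [hk]
    have hlenle : pre.length + 1 ≤ lines.length := by
      subst hdecomp; simp
    have hdrop : lines.drop (pre.length + 1) = suf := by
      rw [hdecomp]; exact drop_after_first pre suf start
    have hidx : (k : Int) + 1 = ((pre.length + 1 : Nat) : Int) := by
      subst hlen; push_cast; ring
    simp only [hidx]
    rw [aFindEnd_spec lines end_labels suf (pre.length + 1) hlenle hdrop]
    have hcast : ((pre.length + 1 : Nat) : Int) + ((suf.takeWhile (fun l => !(end_labels.contains l))).length : Int)
        = (((pre.length + 1) + (suf.takeWhile (fun l => !(end_labels.contains l))).length : Nat) : Int) := by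
      push_cast; ring
    rw [hcast, PySem.List.slice_natCast, hdrop]
    rw [hdecomp, bLoop_skip start end_labels pre suf hnotin, bLoop_collect]
    simp [List.takeWhile_eq_take_findIdx_not]
  · rw [if_pos (by simp [hmem]), bLoop_none start end_labels lines hmem]
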